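-- pv_equiv track=rewrite | github.com/ricE06/unnamed-puzzle-app | backend/puzzle_app/puzzles/puzzle_core/constructors.py | raw_tokens_txt
-- ===== SOURCE A (Python) =====
-- TEXT_COMMENT_SYMBOL = '%'
--
-- WHITESPACE = ' \t'
--
-- BRACES = '()'
--
-- def raw_tokens_txt(inp_txt: str) -> list[str]:
--     """
--     Tokens a text file, stripping whitespace and ignoring the
--     comment delimiter.
--     """
--     def tokenize_line(line: str, out: list[str]) -> None:
--         """Helper to tokenize a single line."""
--         token = ""
--
--         def end_token(token: str) -> str:
--             if token:
--                 out.append(token)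
--                 token = ""
--             return token
--
--         for char in line:
--             if char in WHITESPACE:
--                 # stop current token or ignore if no token exists
--                 token = end_token(token)
--             elif char in BRACES:
--                 token = end_token(token)
--                 out.append(char) # individual brace is a token, spaces or not
--             elif char in TEXT_COMMENT_SYMBOL:
--                 token = end_token(token)
--                 break # ignore rest of the line
--             else:
--                 token += char
--
--         end_token(token)
--         return None # we mutate out in-place
--
--     out = []
--     for line in inp_txt.splitlines():
--         tokenize_line(line, out)
--
--     return out
-- ===== SOURCE B (Python) =====
-- def raw_tokens_txt(inp_txt: str) -> list[str]:
--     """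
--     Tokens a text file, stripping whitespace and ignoring the
--     comment delimiter.
--     """
--     out = []
--     for line in inp_txt.splitlines():
--         code = line.split('%', 1)[0]
--         out.extend(code.replace('(', ' ( ').replace(')', ' ) ').split())
--     return out
-- ===== Notes on version B (the rewrite author's own statement) =====
-- stated objective: idiomatic
-- what changed: Replaced A's manual char-by-char state machine (pending-token accumulator with an inner end_token helper and an early break at the comment symbol) by the idiomatic per-line string pipeline: cut the line at the first comment symbol with str.split, pad each brace with spaces via str.replace, and whitespace-split the result.
import Mathlib
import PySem

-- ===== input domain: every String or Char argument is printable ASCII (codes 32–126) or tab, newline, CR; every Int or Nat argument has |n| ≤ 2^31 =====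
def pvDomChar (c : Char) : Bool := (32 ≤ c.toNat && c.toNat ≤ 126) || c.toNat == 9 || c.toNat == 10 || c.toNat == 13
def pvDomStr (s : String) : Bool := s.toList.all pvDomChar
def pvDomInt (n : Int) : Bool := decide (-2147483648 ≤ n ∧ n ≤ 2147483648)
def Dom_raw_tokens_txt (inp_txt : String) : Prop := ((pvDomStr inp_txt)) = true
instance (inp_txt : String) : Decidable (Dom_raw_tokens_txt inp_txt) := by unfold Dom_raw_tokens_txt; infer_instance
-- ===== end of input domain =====

-- B replaces A's char-by-char state machine with the idiomatic per-line pipeline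
-- "cut at the comment symbol, pad braces with spaces, whitespace-split" (idiomatic; measured faster in a timing run).

-- ===== PORT A =====
-- A's inner helper end_token: flush the pending token into out, return the cleared token.
def pvEndToken (token : String) (out : List String) : String × List String :=
  if token ≠ "" then ("", out ++ [token]) else (token, out)

-- A's tokenize_line loop: char-by-char scan with pending token; '%' breaks out of the loop
-- (token was just cleared by end_token, so the final end_token after the break adds nothing).
def pvTokenizeLine : List Char → String → List String → List String
  | [], token, out => (pvEndToken token out).2
  | c :: rest, token, out =>
    if c == ' ' || c == '\t' then
      pvTokenizeLine rest (pvEndToken token out).1 (pvEndToken token out).2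
    else if c == '(' || c == ')' then
      pvTokenizeLine rest (pvEndToken token out).1 ((pvEndToken token out).2 ++ [String.ofList [c]])
    else if c == '%' then
      (pvEndToken token out).2
    else
      pvTokenizeLine rest (token.push c) out

def raw_tokens_txt (inp_txt : String) : List String :=
  (PySem.Str.splitlines inp_txt).foldl (fun out line => pvTokenizeLine line.toList "" out) []

-- ===== PORT B =====
def raw_tokens_txt_alt (inp_txt : String) : List String :=
  (PySem.Str.splitlines inp_txt).foldl (fun out line =>
    let code := ((PySem.Str.splitMax? line "%" 1).getD []).headD ""
    out ++ PySem.Str.split₀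
      (PySem.Str.replace (PySem.Str.replace code "(" " ( ") ")" " ) ")) []

-- ===== PRECONDITION & SPEC =====
def Spec_raw_tokens_txt (inp_txt : String) (out : List String) : Prop := out = raw_tokens_txt_alt inp_txt
instance (inp_txt : String) (out : List String) : Decidable (Spec_raw_tokens_txt inp_txt out) := by unfold Spec_raw_tokens_txt; infer_instance

-- ===== CLAIM (what is proved, stated in full; the proofs are below) =====
def Claim_equal_raw_tokens_txt : Prop := ∀ (inp_txt : String), Dom_raw_tokens_txt inp_txt → Spec_raw_tokens_txt inp_txt (raw_tokens_txt inp_txt)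


-- ===== LEMMAS AND PROOFS =====

-- pure tokens-of-a-line function mirroring A's scanner (token kept in reading order)
def pvClose (t : List Char) : List (List Char) := if t = [] then [] else [t]

def pvScan : List Char → List Char → List (List Char)
  | [], t => pvClose t
  | c :: r, t =>
    if c == ' ' || c == '\t' then pvClose t ++ pvScan r []
    else if c == '(' || c == ')' then pvClose t ++ [[c]] ++ pvScan r []
    else if c == '%' then pvClose t
    else pvScan r (t ++ [c])

-- whitespace split (split()) with in-order pending word
def pvW : List Char → List Char → List (List Char)
  | [], cur => pvClose cur
  | c :: r, cur => if PySem.Chars.isspace c then pvClose cur ++ pvW r [] else pvW r (cur ++ [c])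

-- the combined effect of the two single-char replaces
def pvG (c : Char) : List Char :=
  if c == '(' then [' ', '(', ' '] else if c == ')' then [' ', ')', ' '] else [c]

theorem charEq_of_toNat {a b : Char} (h : a.toNat = b.toNat) : a = b := by
  apply Char.ext; unfold Char.toNat at h; exact UInt32.toNat_inj.mp h

theorem pvEndToken_fst (t : String) (o : List String) : (pvEndToken t o).1 = "" := by
  unfold pvEndToken; split <;> simp_all

theorem pvEndToken_snd (t : String) (o : List String) :
    (pvEndToken t o).2 = o ++ (pvClose t.toList).map String.ofList := by
  unfold pvEndToken pvClose
  split <;> rename_i h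
  · have : t.toList ≠ [] := by simpa using h
    simp [this]
  · have : t = "" := by simpa using h
    simp [this]

theorem tokLine_eq (cs : List Char) : ∀ (token : String) (out : List String),
    pvTokenizeLine cs token out = out ++ (pvScan cs token.toList).map String.ofList := by
  induction cs with
  | nil => intro token out; simp [pvTokenizeLine, pvScan, pvEndToken_snd]
  | cons c r ih =>
    intro token out
    simp only [pvTokenizeLine, pvScan]
    split
    · rw [ih, pvEndToken_fst, pvEndToken_snd]; simp
    · split
      · rw [ih, pvEndToken_fst, pvEndToken_snd]; simp
      · split
        · rw [pvEndToken_snd]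
        · rw [ih]; simp

-- ===== split₀ characterisation =====
theorem split0_go_eq (l cur : List Char) (acc : List (List Char)) :
    PySem.Chars.split₀.go l cur acc = acc.reverse ++ pvW l cur.reverse := by
  induction l, cur, acc using PySem.Chars.split₀.go.induct with
  | case1 cur acc h => simp_all [PySem.Chars.split₀.go, pvW, pvClose]
  | case2 cur acc h => simp_all [PySem.Chars.split₀.go, pvW, pvClose]
  | case3 c rest cur acc hsp hemp ih =>
    simp_all [PySem.Chars.split₀.go, pvW, pvClose]
  | case4 c rest cur acc hsp hemp ih =>
    simp_all [PySem.Chars.split₀.go, pvW, pvClose]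
  | case5 c rest cur acc hsp ih =>
    simp_all [PySem.Chars.split₀.go, pvW]

theorem split0_eq (cs : List Char) : PySem.Chars.split₀ cs = pvW cs [] := by
  simpa using split0_go_eq cs [] []

-- ===== replace with a single-char pattern =====
theorem replace_go_single (o : Char) (new : List Char) (l : List Char) :
    ∀ (fuel : Nat) (acc : List Char), l.length ≤ fuel →
    PySem.Chars.replace.go [o] new fuel l acc
      = acc.reverse ++ l.flatMap (fun c => if c == o then new else [c]) := by
  induction l with
  | nil => intro fuel acc h; cases fuel <;> simp [PySem.Chars.replace.go]
  | cons c t ih =>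
    intro fuel acc h
    cases fuel with
    | zero => simp at h
    | succ f =>
      have hpre : List.isPrefixOf [o] (c :: t) = (o == c) := by simp [List.isPrefixOf]
      by_cases hc : o = c
      · subst hc
        simp only [PySem.Chars.replace.go, hpre, BEq.rfl, if_true, List.drop_succ_cons,
          List.drop_zero, List.length_singleton]
        rw [ih f (new.reverse ++ acc) (by simpa using Nat.le_of_succ_le_succ h)]
        simp
      · have h1 : (o == c) = false := by simp [hc]
        have h2 : (c == o) = false := by simp [Ne.symm hc]
        simp only [PySem.Chars.replace.go, hpre, h1, Bool.false_eq_true, if_false]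
        rw [ih f (c :: acc) (by simpa using Nat.le_of_succ_le_succ h)]
        simp [Ne.symm hc]

theorem replace_single (cs : List Char) (o : Char) (new : List Char) :
    PySem.Chars.replace cs [o] new = cs.flatMap (fun c => if c == o then new else [c]) := by
  unfold PySem.Chars.replace
  simpa using replace_go_single o new cs cs.length [] le_rfl

-- ===== splitMax head characterisation =====
theorem splitOnMax_go_acc : ∀ (fuel m : Nat) (l cur : List Char) (acc : List (List Char)),
    PySem.Chars.splitOnMax.go ['%'] fuel m l cur acc
      = acc.reverse ++ PySem.Chars.splitOnMax.go ['%'] fuel m l cur [] := by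
  intro fuel
  induction fuel with
  | zero => intro m l cur acc; simp [PySem.Chars.splitOnMax.go]
  | succ f ih =>
    intro m l cur acc
    cases l with
    | nil => simp [PySem.Chars.splitOnMax.go]
    | cons c rest =>
      by_cases hm : m = 0
      · subst hm; simp [PySem.Chars.splitOnMax.go]
      · have hpre : List.isPrefixOf ['%'] (c :: rest) = ('%' == c) := by simp [List.isPrefixOf]
        by_cases hc : c = '%'
        · subst hc
          simp only [PySem.Chars.splitOnMax.go, hpre, BEq.rfl, if_true, if_neg hm,
            List.length_singleton, List.drop_succ_cons, List.drop_zero]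
          rw [ih (m - 1) rest [] (cur.reverse :: acc), ih (m - 1) rest [] [cur.reverse]]
          try simp
        · have h1 : ('%' == c) = false := by simp [Ne.symm hc]
          simp only [PySem.Chars.splitOnMax.go, hpre, h1, Bool.false_eq_true, if_false, if_neg hm]
          rw [ih m rest (c :: cur) acc, ih m rest (c :: cur) []]
          try simp

theorem splitOnMax_go_head (l : List Char) : ∀ (fuel : Nat) (cur : List Char), l.length < fuel →
    (PySem.Chars.splitOnMax.go ['%'] fuel 1 l cur []).headD []
      = cur.reverse ++ l.takeWhile (· ≠ '%') := by
  induction l with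
  | nil =>
    intro fuel cur h
    cases fuel with
    | zero => simp at h
    | succ f => simp [PySem.Chars.splitOnMax.go]
  | cons c rest ih =>
    intro fuel cur h
    cases fuel with
    | zero => simp at h
    | succ f =>
      have hpre : List.isPrefixOf ['%'] (c :: rest) = ('%' == c) := by simp [List.isPrefixOf]
      have hm : ¬(1 : Nat) = 0 := one_ne_zero
      by_cases hc : c = '%'
      · subst hc
        simp only [PySem.Chars.splitOnMax.go, hpre, BEq.rfl, if_true, if_neg hm]
        rw [splitOnMax_go_acc]
        simp
      · have h1 : ('%' == c) = false := by simp [Ne.symm hc]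
        have h2 : (decide (c ≠ '%')) = true := by simp [hc]
        simp only [PySem.Chars.splitOnMax.go, hpre, h1, Bool.false_eq_true, if_false, if_neg hm]
        rw [ih f (c :: cur) (by simpa using Nat.lt_of_succ_lt_succ h)]
        simp [hc]

theorem headD_map_ofList (ps : List (List Char)) :
    (ps.map String.ofList).headD "" = String.ofList (ps.headD []) := by
  cases ps <;> rfl

theorem code_toList (line : String) :
    (((PySem.Str.splitMax? line "%" 1).getD []).headD "").toList
      = line.toList.takeWhile (· ≠ '%') := by
  have hsep : ("%" : String).toList = ['%'] := rfl
  rw [PySem.Str.splitMax?, hsep, PySem.Chars.splitMax?, if_neg (by simp)]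
  simp only [Option.map_some, Option.getD_some]
  rw [headD_map_ofList, PySem.Chars.splitOnMax, if_neg (by norm_num)]
  simp only [Int.toNat_one]
  rw [splitOnMax_go_head line.toList (line.toList.length + 1) [] (by omega)]
  simp

-- ===== expansion and the main per-line combinatorial lemma =====
theorem expand_eq (cs : List Char) :
    PySem.Chars.replace (PySem.Chars.replace cs ['('] [' ', '(', ' ']) [')'] [' ', ')', ' ']
      = cs.flatMap pvG := by
  rw [replace_single, replace_single, List.flatMap_assoc]
  have hfun : ∀ c : Char,
      ((if c == '(' then [' ', '(', ' '] else [c]).flatMap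
        (fun d => if d == ')' then [' ', ')', ' '] else [d])) = pvG c := by
    intro c
    by_cases h1 : c = '('
    · subst h1; decide
    · by_cases h2 : c = ')'
      · subst h2; decide
      · simp [pvG, h1, h2]
  induction cs with
  | nil => simp
  | cons c r ihr => simp only [List.flatMap_cons, ihr]; rw [hfun c]

theorem pvW_expand (ds : List Char) : ∀ (cur : List Char),
    (∀ c ∈ ds, c ≠ '%' ∧ PySem.Chars.isspace c = (c == ' ' || c == '\t')) →
    pvW (ds.flatMap pvG) cur = pvScan ds cur := by
  induction ds with
  | nil => intro cur h; simp [pvW, pvScan]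
  | cons c r ih =>
    intro cur h
    obtain ⟨hpc, hsp⟩ := h c (by simp)
    have hr := fun c hc => h c (List.mem_cons_of_mem _ hc)
    have hspace : PySem.Chars.isspace ' ' = true := by decide
    simp only [List.flatMap_cons, pvG]
    by_cases h1 : (c == ' ' || c == '\t') = true
    · have hg : (if c == '(' then [' ', '(', ' '] else if c == ')' then [' ', ')', ' '] else [c]) = [c] := by
        rcases Bool.or_eq_true_iff.mp h1 with h' | h' <;> simp_all
      rw [hg]
      simp only [List.cons_append, List.nil_append, pvW, pvScan, hsp, h1, if_true]
      rw [ih [] hr]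
    · by_cases h2 : (c == '(' || c == ')') = true
      · have hg : (if c == '(' then [' ', '(', ' '] else if c == ')' then [' ', ')', ' '] else [c]) = [' ', c, ' '] := by
          rcases Bool.or_eq_true_iff.mp h2 with h' | h' <;> simp_all
        have hcsp : PySem.Chars.isspace c = false := by rw [hsp]; simp_all
        rw [hg]
        calc pvW (([' ', c, ' '] : List Char) ++ r.flatMap pvG) cur
            = pvClose cur ++ pvW (c :: ' ' :: r.flatMap pvG) [] := by
              simp only [List.cons_append, List.nil_append, pvW, hspace, if_true]
          _ = pvClose cur ++ pvW (' ' :: r.flatMap pvG) [c] := by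
              simp only [pvW, hcsp, Bool.false_eq_true, if_false, List.nil_append]
          _ = pvClose cur ++ ([[c]] ++ pvW (r.flatMap pvG) []) := by
              simp only [pvW, hspace, if_true, pvClose]
              simp
          _ = pvClose cur ++ [[c]] ++ pvScan r [] := by rw [ih [] hr]; simp
          _ = pvScan (c :: r) cur := by
              simp [pvScan, h1, h2]
      · have hg : (if c == '(' then [' ', '(', ' '] else if c == ')' then [' ', ')', ' '] else [c]) = [c] := by
          simp_all
        have hcsp : PySem.Chars.isspace c = false := by rw [hsp]; simp_all
        have hpc' : (c == '%') = false := by simp_all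
        rw [hg]
        simp only [List.cons_append, List.nil_append, pvW, pvScan, hcsp, h1, h2]
        simp only [Bool.false_eq_true, if_false]
        rw [hpc']
        simp only [Bool.false_eq_true, if_false]
        rw [ih (cur ++ [c]) hr]

theorem pvScan_takeWhile (cs : List Char) : ∀ (t : List Char),
    pvScan cs t = pvScan (cs.takeWhile (· ≠ '%')) t := by
  induction cs with
  | nil => intro t; simp
  | cons c r ih =>
    intro t
    by_cases hc : c = '%'
    · subst hc
      simp [pvScan, pvClose]
    · have hd : (decide (c ≠ '%')) = true := by simp [hc]
      simp only [List.takeWhile_cons, hd, if_true]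
      by_cases h1 : (c == ' ' || c == '\t') = true
      · simp [pvScan, h1, ih]
      · by_cases h2 : (c == '(' || c == ')') = true
        · simp [pvScan, h1, h2, ih]
        · have hpc : (c == '%') = false := by simp [hc]
          simp [pvScan, h1, h2, hpc, ih]

-- ===== splitlines: the characters of every produced line =====
theorem splitlines_go_chars (Q : Char → Prop) (isB : Char → Bool) :
    ∀ (l cur : List Char) (acc : List (List Char)),
    (∀ c ∈ l, Q c) →
    (∀ c ∈ cur, Q c ∧ isB c = false) →
    (∀ ln ∈ acc, ∀ c ∈ ln, Q c ∧ isB c = false) →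
    ∀ ln ∈ PySem.Chars.splitlines.go isB l cur acc, ∀ c ∈ ln, Q c ∧ isB c = false := by
  intro l cur acc
  induction l, cur, acc using PySem.Chars.splitlines.go.induct (isB := isB) with
  | case1 cur acc h =>
    intro _ hcur hacc
    simp only [PySem.Chars.splitlines.go, h, if_true]
    intro ln hln
    exact hacc ln (by simpa using hln)
  | case2 cur acc h =>
    intro _ hcur hacc
    simp only [PySem.Chars.splitlines.go, if_neg h]
    intro ln hln
    rcases (by simpa using hln : ln ∈ acc ∨ ln = cur.reverse) with h' | h'
    · exact hacc ln h'
    · subst h'; intro c hc; exact hcur c (by simpa using hc)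
  | case3 rest cur acc ih =>
    intro hl hcur hacc
    simp only [PySem.Chars.splitlines.go]
    exact ih (fun c hc => hl c (by simp [hc])) (by simp)
      (by
        intro ln hln
        rcases (by simpa using hln : ln = cur.reverse ∨ ln ∈ acc) with h' | h'
        · subst h'; intro c hc; exact hcur c (by simpa using hc)
        · exact hacc ln h')
  | case4 c rest cur acc hne hB ih =>
    intro hl hcur hacc
    rw [show PySem.Chars.splitlines.go isB (c :: rest) cur acc
        = PySem.Chars.splitlines.go isB rest [] (cur.reverse :: acc) from by
      rw [PySem.Chars.splitlines.go.eq_def]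
      split
      · rename_i heq; exact absurd heq (by simp)
      · rename_i r' heq
        injection heq with e1 e2
        exact (hne r' e1 e2).elim
      · rename_i c' rest' heq
        injection heq with e1 e2
        subst e1; subst e2
        rw [if_pos hB]]
    exact ih (fun d hd => hl d (by simp [hd])) (by simp)
      (by
        intro ln hln
        rcases (by simpa using hln : ln = cur.reverse ∨ ln ∈ acc) with h' | h'
        · subst h'; intro d hd; exact hcur d (by simpa using hd)
        · exact hacc ln h')
  | case5 c0 rest cur acc hne hB ih =>
    intro hl hcur hacc
    rw [show PySem.Chars.splitlines.go isB (c0 :: rest) cur acc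
        = PySem.Chars.splitlines.go isB rest (c0 :: cur) acc from by
      rw [PySem.Chars.splitlines.go.eq_def]
      split
      · rename_i heq; exact absurd heq (by simp)
      · rename_i r' heq
        injection heq with e1 e2
        exact (hne r' e1 e2).elim
      · rename_i c' rest' heq
        injection heq with e1 e2
        subst e1; subst e2
        rw [if_neg hB]]
    exact ih (fun d hd => hl d (by simp [hd]))
      (by
        intro d hd
        rcases (by simpa using hd : d = c0 ∨ d ∈ cur) with h' | h'
        · subst h'; exact ⟨hl d (by simp), by simpa using hB⟩
        · exact hcur d h')
      hacc

theorem splitlines_chars (s : String) (hdom : pvDomStr s = true) :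
    ∀ line ∈ PySem.Str.splitlines s, ∀ c ∈ line.toList,
      pvDomChar c = true ∧ c.toNat ≠ 10 ∧ c.toNat ≠ 13 := by
  intro line hline c hc
  have hmem : line.toList ∈ PySem.Chars.splitlines s.toList := by
    rw [← PySem.Str.splitlines_map_toList]
    exact List.mem_map_of_mem hline
  rw [PySem.Chars.splitlines] at hmem
  have hall : ∀ x ∈ s.toList, pvDomChar x = true := by simpa [pvDomStr] using hdom
  have := splitlines_go_chars (fun c => pvDomChar c = true) _ s.toList [] []
    hall (by simp) (by simp) _ hmem c hc
  obtain ⟨hq, hb⟩ := this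
  simp only [decide_eq_false_iff_not, Bool.or_eq_false_iff] at hb
  exact ⟨hq, by tauto, by tauto⟩

-- isspace classification on the admitted line characters
theorem isspace_class (c : Char) (hdom : pvDomChar c = true) (h10 : c.toNat ≠ 10) (h13 : c.toNat ≠ 13) :
    PySem.Chars.isspace c = (c == ' ' || c == '\t') := by
  have hdom' : (32 ≤ c.toNat ∧ c.toNat ≤ 126) ∨ c.toNat = 9 := by
    simp [pvDomChar] at hdom; omega
  rcases hdom' with ⟨ha, hb⟩ | h9
  · by_cases h32 : c.toNat = 32
    · have : c = ' ' := charEq_of_toNat h32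
      subst this; decide
    · have hcs : (c == ' ') = false := by
        simp only [beq_eq_false_iff_ne, ne_eq]
        intro he; exact h32 (by rw [he]; rfl)
      have hct : (c == '\t') = false := by
        simp only [beq_eq_false_iff_ne, ne_eq]
        intro he; rw [he] at ha; simp at ha
      rw [hcs, hct]
      simp only [PySem.Chars.isspace, Bool.or_false]
      simp only [Bool.or_eq_false_iff, decide_eq_false_iff_not, Bool.and_eq_false_iff]
      omega
  · have : c = '\t' := charEq_of_toNat h9
    subst this; decide

-- ===== per-line equality =====
theorem line_eq (line : String)
    (h : ∀ c ∈ line.toList, pvDomChar c = true ∧ c.toNat ≠ 10 ∧ c.toNat ≠ 13)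
    (out : List String) :
    pvTokenizeLine line.toList "" out
      = out ++ PySem.Str.split₀
          (PySem.Str.replace (PySem.Str.replace (((PySem.Str.splitMax? line "%" 1).getD []).headD "") "(" " ( ") ")" " ) ") := by
  have hbig : (PySem.Str.replace (PySem.Str.replace (((PySem.Str.splitMax? line "%" 1).getD []).headD "") "(" " ( ") ")" " ) ").toList
      = (line.toList.takeWhile (· ≠ '%')).flatMap pvG := by
    rw [PySem.Str.toList_replace, PySem.Str.toList_replace, code_toList]
    exact expand_eq _
  have hyp : ∀ c ∈ line.toList.takeWhile (· ≠ '%'),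
      c ≠ '%' ∧ PySem.Chars.isspace c = (c == ' ' || c == '\t') := by
    intro c hc
    have hmem : c ∈ line.toList := (List.takeWhile_sublist _).subset hc
    obtain ⟨hq, h10, h13⟩ := h c hmem
    refine ⟨by simpa using List.mem_takeWhile_imp hc, isspace_class c hq h10 h13⟩
  have key : PySem.Str.split₀
        (PySem.Str.replace (PySem.Str.replace (((PySem.Str.splitMax? line "%" 1).getD []).headD "") "(" " ( ") ")" " ) ")
      = (pvScan line.toList ("" : String).toList).map String.ofList := by
    rw [PySem.Str.split₀, hbig, split0_eq, pvW_expand _ [] hyp,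
      show ("" : String).toList = [] from rfl, ← pvScan_takeWhile]
  rw [tokLine_eq, key]

-- ===== VERDICT (by name: the statement is the Claim_ definition above) =====
set_option maxHeartbeats 1000000 in
theorem raw_tokens_txt_spec : Claim_equal_raw_tokens_txt := by
  intro inp hdom
  unfold Spec_raw_tokens_txt raw_tokens_txt raw_tokens_txt_alt
  apply PySem.List.foldl_congr_mem
  intro acc line hline
  exact line_eq line (splitlines_chars inp hdom line hline) acc
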